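-- pv_equiv track=rewrite | github.com/mik11231/python | advent2017/extras/python/days/day22.py | parse_packed
-- ===== SOURCE A (Python) =====
-- def parse_packed(text: str) -> list[int]:
--     lines = [ln.strip() for ln in text.splitlines() if ln.strip()]
--     n = len(lines)
--     off = n // 2
--     inf: list[int] = []
--     for r, row in enumerate(lines):
--         rr = r - off
--         for c, ch in enumerate(row):
--             if ch == "#":
--                 cc = c - off
--                 key = (rr << 32) ^ (cc & 0xFFFFFFFF)
--                 inf.append(key)
--     return inf
-- ===== SOURCE B (Python) =====
-- def parse_packed(text: str) -> list[int]:
--     lines = [ln.strip() for ln in text.splitlines() if ln.strip()]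
--     off = len(lines) // 2
--     # prefix sums: global start offset of each row inside the '\n'-joined grid
--     starts = []
--     total = 0
--     for ln in lines:
--         starts.append(total)
--         total += len(ln) + 1
--     grid = "\n".join(lines)
--     out = []
--     r = 0
--     p = -1
--     for seg in grid.split("#")[:-1]:
--         p += len(seg) + 1          # global position of the next '#'
--         while r + 1 < len(starts) and starts[r + 1] <= p:
--             r += 1                 # advance the row pointer (positions only grow)
--         out.append(((r - off) << 32) ^ ((p - starts[r] - off) & 0xFFFFFFFF))
--     return out
-- ===== Notes on version B (the rewrite author's own statement) =====
-- stated objective: faster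
-- what changed: Instead of A's nested row-by-row, char-by-char scan, B flattens the grid into one newline-joined string, splits it once on the mark character, recovers each mark's global offset from segment lengths, and maps offsets back to (row, column) with a prefix-sum table of row starts and a merge-style advancing row pointer.
import Mathlib
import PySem

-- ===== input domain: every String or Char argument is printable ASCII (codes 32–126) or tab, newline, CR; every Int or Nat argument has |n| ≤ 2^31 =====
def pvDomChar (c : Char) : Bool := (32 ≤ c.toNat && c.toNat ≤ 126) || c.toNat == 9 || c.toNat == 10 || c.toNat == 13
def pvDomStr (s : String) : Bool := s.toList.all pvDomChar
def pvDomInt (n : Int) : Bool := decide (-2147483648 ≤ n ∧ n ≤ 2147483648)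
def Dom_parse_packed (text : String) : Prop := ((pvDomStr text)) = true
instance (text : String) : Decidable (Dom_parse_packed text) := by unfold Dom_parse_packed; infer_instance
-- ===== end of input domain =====

-- B flattens the grid to one newline-joined string, splits it once on the mark character, and
-- recovers each mark's (row, column) from global offsets via prefix-sum row starts and a
-- merge-style row pointer (measured faster: per-mark Python work instead of per-character).

-- ===== PORT A =====
def parse_packed (text : String) : List Int :=
  let lines : List String := (PySem.Str.splitlines text).filterMap (fun ln =>
    if PySem.Str.strip ln ≠ "" then some (PySem.Str.strip ln) else none)
  let n : Int := lines.length
  let off : Int := PySem.Int.floordiv n 2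
  (PySem.List.enumerate lines).foldl (fun inf rrow =>
    let rr : Int := rrow.1 - off
    (PySem.List.enumerate rrow.2.toList).foldl (fun inf cch =>
      if cch.2 == '#' then
        inf ++ [PySem.Int.bxor (rr <<< (32 : Nat)) (PySem.Int.band (cch.1 - off) 4294967295)]
      else inf) inf) []

-- ===== PORT B =====
-- the 'while r + 1 < len(starts) and starts[r+1] <= p: r += 1' loop of Source B
def pvAdvance (starts : List Int) (p : Int) (r : Nat) : Nat :=
  if h : r + 1 < starts.length ∧ starts.getD (r + 1) 0 ≤ p then pvAdvance starts p (r + 1) else r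
termination_by starts.length - r
decreasing_by omega

-- the 'for seg in grid.split("#")[:-1]' loop of Source B, state (p, r, out)
def pvBLoop (off : Int) (starts : List Int) : List (List Char) → Int → Nat → List Int → List Int
  | [], _, _, out => out
  | seg :: segs, p, r, out =>
    let p' := p + (seg.length : Int) + 1
    let r' := pvAdvance starts p' r
    pvBLoop off starts segs p' r'
      (out ++ [PySem.Int.bxor (((r' : Int) - off) <<< (32 : Nat))
                (PySem.Int.band (p' - starts.getD r' 0 - off) 4294967295)])

def parse_packed_alt (text : String) : List Int :=
  let lines : List String := (PySem.Str.splitlines text).filterMap (fun ln =>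
    if PySem.Str.strip ln ≠ "" then some (PySem.Str.strip ln) else none)
  let off : Int := PySem.Int.floordiv (lines.length : Int) 2
  -- starts/total accumulation loop
  let st := lines.foldl (fun st ln => (st.1 ++ [st.2], st.2 + (PySem.Str.len ln : Int) + 1))
    (([] : List Int), (0 : Int))
  let grid : String := PySem.Str.join "\n" lines
  let segs : List (List Char) :=
    PySem.List.slice (PySem.Chars.splitOn grid.toList ['#']) none (some (-1))
  pvBLoop off st.1 segs (-1) 0 []

-- ===== PRECONDITION & SPEC =====
def Spec_parse_packed (text : String) (out : List Int) : Prop := out = parse_packed_alt text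
instance (text : String) (out : List Int) : Decidable (Spec_parse_packed text out) := by
  unfold Spec_parse_packed; infer_instance

-- ===== CLAIM =====
def Claim_equal_parse_packed : Prop :=
  ∀ (text : String), Dom_parse_packed text → Spec_parse_packed text (parse_packed text)

-- ===== LEMMAS AND PROOFS =====

-- the packed key
def pvKey (off r j : Int) : Int :=
  PySem.Int.bxor ((r - off) <<< (32 : Nat)) (PySem.Int.band (j - off) 4294967295)

-- indices of the '#' marks of a row / of the flattened grid
def pvMarks (cs : List Char) : List Nat :=
  (List.range cs.length).filter (fun j => cs.getD j ' ' == '#')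

-- simple recursion computing Python's s.split('#')
def pvSplitSpec : List Char → List (List Char)
  | [] => [[]]
  | c :: t =>
    if c = '#' then [] :: pvSplitSpec t
    else match pvSplitSpec t with
         | h :: tl => (c :: h) :: tl
         | [] => [[c]]

-- prepend onto the first piece
def pvConsFirst (p : List Char) : List (List Char) → List (List Char)
  | h :: tl => (p ++ h) :: tl
  | [] => [p]

-- the emission loop of B re-expressed over the list of global mark positions
def pvRunMarks (off : Int) (starts : List Int) : List Nat → Nat → List Int → List Int
  | [], _, out => out
  | j :: js, r, out =>
    let r' := pvAdvance starts (j : Int) r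
    pvRunMarks off starts js r' (out ++ [pvKey off (r' : Int) ((j : Int) - starts.getD r' 0)])

-- global start offset of row k inside the '\n'-joined grid
def pvStartsN (rws : List (List Char)) (k : Nat) : Nat :=
  ((rws.take k).map (fun row => row.length + 1)).sum

-- the common specification: row-major keys
def pvSpec (off : Int) (rws : List (List Char)) (s : Int) : List Int :=
  (PySem.List.enumerate rws s).flatMap (fun rc => (pvMarks rc.2).map (fun j => pvKey off rc.1 (j : Int)))
theorem pv_splitSpec_ne_nil (cs : List Char) : pvSplitSpec cs ≠ [] := by
  cases cs with
  | nil => simp [pvSplitSpec]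
  | cons c t =>
    simp only [pvSplitSpec]
    split
    · simp
    · split <;> simp

theorem pv_marks_cons (c : Char) (t : List Char) :
    pvMarks (c :: t) = (if c = '#' then [0] else []) ++ (pvMarks t).map (1 + ·) := by
  unfold pvMarks
  rw [List.length_cons, show t.length + 1 = 1 + t.length from by omega, List.range_add,
    List.filter_append, List.filter_map]
  simp only [List.range_one, Function.comp_def]
  simp only [show ∀ x : Nat, 1 + x = x + 1 from fun x => Nat.add_comm 1 x, List.getD_cons_succ]
  by_cases h : c = '#' <;> simp [h, List.filter]
  rw [show (c == '#') = false from by simp [h]]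
theorem pv_marks_append (xs ys : List Char) :
    pvMarks (xs ++ ys) = pvMarks xs ++ (pvMarks ys).map (xs.length + ·) := by
  unfold pvMarks
  rw [List.length_append, List.range_add, List.filter_append, List.filter_map]
  congr 1
  · apply List.filter_congr
    intro j hj
    rw [List.getD_append _ _ _ _ (List.mem_range.mp hj)]
  · simp only [Function.comp_def]
    congr 1
    apply List.filter_congr
    intro j hj
    rw [List.getD_append_right]
    · simp
    · omega
theorem pv_marks_nil_of_count (t : List Char) (h : t.count '#' = 0) : pvMarks t = [] := by
  unfold pvMarks
  apply List.filter_eq_nil_iff.mpr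
  intro j hj
  have hjl := List.mem_range.mp hj
  have : t.getD j ' ' = t[j] := by simp [List.getD_eq_getElem?_getD, List.getElem?_eq_getElem hjl]
  rw [this]
  have hne : t[j] ≠ '#' := by
    intro he
    have : '#' ∈ t := he ▸ List.getElem_mem hjl
    simp [List.count_eq_zero] at h
    exact h this
  simp [hne]

theorem pv_splitSpec_length (t : List Char) :
    (pvSplitSpec t).length = t.count '#' + 1 := by
  induction t with
  | nil => simp [pvSplitSpec]
  | cons c t ih =>
    simp only [pvSplitSpec]
    by_cases h : c = '#'
    · simp [h, ih]
    · rw [if_neg h]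
      rcases he : pvSplitSpec t with _ | ⟨hd, tl⟩
      · exact absurd he (pv_splitSpec_ne_nil t)
      · rw [he] at ih
        simp at ih
        simp [h, ← ih]

theorem pv_slice_neg_one {α : Type} (xs : List α) (h : xs ≠ []) :
    PySem.List.slice xs none (some (-1)) = xs.dropLast := by
  have hl : 1 ≤ xs.length := List.length_pos_iff.mpr h
  simp [PySem.List.slice, PySem.List.clampIdx, h]
  rw [show ((xs.length : Int) + -1).toNat = xs.length - 1 from by omega, List.dropLast_eq_take]
theorem pv_go_eq (l : List Char) : ∀ (fuel : Nat), l.length < fuel →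
    ∀ (cur : List Char) (acc : List (List Char)),
    PySem.Chars.splitOn.go ['#'] fuel l cur acc =
      acc.reverse ++ pvConsFirst cur.reverse (pvSplitSpec l) := by
  induction l with
  | nil =>
    intro fuel hf cur acc
    match fuel, hf with
    | f + 1, _ =>
      rw [PySem.Chars.splitOn.go]
      · simp [pvSplitSpec, pvConsFirst]
      · omega
  | cons c rest ih =>
    intro fuel hf cur acc
    match fuel, hf with
    | f + 1, hf =>
      rw [PySem.Chars.splitOn.go]
      by_cases h : c = '#'
      · rw [if_pos (by simp [h, List.isPrefixOf])]
        simp only [List.length_singleton, List.drop_one, List.tail_cons]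
        rw [ih f (by simpa using hf) [] (cur.reverse :: acc)]
        simp [pvSplitSpec, h, pvConsFirst]
        cases hs : pvSplitSpec rest with
        | nil => exact absurd hs (pv_splitSpec_ne_nil rest)
        | cons a b => simp
      · rw [if_neg (by simp [List.isPrefixOf]; intro hc; exact absurd hc.symm h)]
        rw [ih f (by simpa using hf) (c :: cur) acc]
        simp only [pvSplitSpec, if_neg h, List.reverse_cons]
        cases hs : pvSplitSpec rest with
        | nil => exact absurd hs (pv_splitSpec_ne_nil rest)
        | cons a b => simp [pvConsFirst]

theorem pv_splitOn_eq (cs : List Char) : PySem.Chars.splitOn cs ['#'] = pvSplitSpec cs := by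
  unfold PySem.Chars.splitOn
  rw [pv_go_eq cs (cs.length + 1) (by omega) [] []]
  cases hs : pvSplitSpec cs with
  | nil => exact absurd hs (pv_splitSpec_ne_nil cs)
  | cons a b => simp [pvConsFirst]
theorem pv_bloop_eq_runMarks (off : Int) (starts : List Int) (cs : List Char) :
    ∀ (p0 : Nat) (r : Nat) (out : List Int),
    pvBLoop off starts ((pvSplitSpec cs).dropLast) ((p0 : Int) - 1) r out =
      pvRunMarks off starts ((pvMarks cs).map (p0 + ·)) r out := by
  induction cs with
  | nil =>
    intro p0 r out
    simp [pvSplitSpec, pvMarks, pvBLoop, pvRunMarks]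
  | cons c t ih =>
    intro p0 r out
    rw [pv_marks_cons]
    by_cases h : c = '#'
    · simp only [pvSplitSpec, if_pos h]
      rw [List.dropLast_cons_of_ne_nil (pv_splitSpec_ne_nil t)]
      simp only [pvBLoop, List.length_nil, List.map_append, List.map_map,
        List.map_cons, List.map_nil, Nat.cast_zero, Nat.add_zero, Function.comp_def]
      rw [List.singleton_append,
        show ((p0 : Int) - 1 + 0 + 1) = ((p0 : Int)) from by ring]
      simp only [pvRunMarks, pvKey]
      rw [show ((p0 : Int)) = (((p0 + 1 : Nat) : Int)) - 1 from by push_cast; ring]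
      rw [ih (p0 + 1)]
      simp [Nat.add_assoc]
    · rcases hs : pvSplitSpec t with _ | ⟨hd, tl⟩
      · exact absurd hs (pv_splitSpec_ne_nil t)
      simp only [pvSplitSpec, if_neg h, hs]
      rcases tl with _ | ⟨tl1, tl2⟩
      · have hc : t.count '#' = 0 := by
          have hl := pv_splitSpec_length t
          rw [hs] at hl
          simpa using hl
        rw [pv_marks_nil_of_count t hc]
        simp [pvBLoop, pvRunMarks]
      · have ih' := ih (p0 + 1) r out
        rw [hs] at ih'
        simp only [List.dropLast_cons₂] at ih' ⊢
        simp only [pvBLoop] at ih' ⊢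
        rw [show ((p0 : Int) - 1 + (((c :: hd).length : Nat) : Int) + 1)
              = (((p0 + 1 : Nat) : Int) - 1 + ((hd.length : Nat) : Int) + 1) from by
          simp only [List.length_cons]; push_cast; ring]
        rw [ih']
        simp [Nat.add_assoc]

theorem pv_advance_eq (starts : List Int) (n : Nat) (hn : starts.length = n)
    (rt : Nat) (hrt : rt < n) (p : Int)
    (hlo : ∀ i : Nat, i ≤ rt → starts.getD i 0 ≤ p)
    (hhi : rt + 1 < n → p < starts.getD (rt + 1) 0) :
    ∀ r : Nat, r ≤ rt → pvAdvance starts p r = rt := by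
  intro r hr
  induction hd : rt - r generalizing r with
  | zero =>
    have : r = rt := by omega
    subst this
    rw [pvAdvance]
    rw [dif_neg]
    intro ⟨h1, h2⟩
    exact absurd h2 (by simpa using not_le.mpr (hhi (by omega)))
  | succ k ih =>
    rw [pvAdvance, dif_pos ⟨by omega, hlo (r+1) (by omega)⟩]
    exact ih (r + 1) (by omega) (by omega)

theorem pv_enumerate_map {α β : Type} (f : α → β) (l : List α) :
    ∀ s : Int, PySem.List.enumerate (l.map f) s
      = (PySem.List.enumerate l s).map (fun p => (p.1, f p.2)) := by
  induction l with
  | nil => intro s; rfl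
  | cons x t ih => intro s; simp only [List.map_cons]; rw [show PySem.List.enumerate (f x :: t.map f) s = (s, f x) :: PySem.List.enumerate (t.map f) (s+1) from rfl]; rw [ih]; rfl
theorem pv_startsN_cons (row : List Char) (rest : List (List Char)) (i : Nat) :
    pvStartsN (row :: rest) (i + 1) = row.length + 1 + pvStartsN rest i := by
  simp [pvStartsN, List.take_succ_cons]

theorem pv_startsN_succ (rws : List (List Char)) (k : Nat) (hk : k < rws.length) :
    pvStartsN rws (k + 1) = pvStartsN rws k + (rws.getD k []).length + 1 := by
  induction rws generalizing k with
  | nil => simp at hk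
  | cons row rest ih =>
    cases k with
    | zero => rw [pv_startsN_cons]; simp [pvStartsN]; try omega
    | succ k =>
      rw [pv_startsN_cons, pv_startsN_cons, ih k (by simpa using hk)]
      simp
      omega

theorem pv_startsN_mono (rws : List (List Char)) (i k : Nat) (h : i ≤ k) :
    pvStartsN rws i ≤ pvStartsN rws k := by
  unfold pvStartsN
  rw [List.map_take, List.map_take, show k = i + (k - i) from by omega, List.take_add,
    List.sum_append]
  omega
theorem pv_group (off : Int) (starts : List Int) (rws : List (List Char))
    (hlen : starts.length = rws.length)
    (hget : ∀ i, i < rws.length → starts.getD i 0 = (pvStartsN rws i : Int))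
    (k : Nat) (hk : k < rws.length) :
    ∀ (ms : List Nat), (∀ c ∈ ms, c < (rws.getD k []).length) →
    ∀ (r : Nat), r ≤ k → ∀ (out : List Int) (js : List Nat),
    pvRunMarks off starts ((ms.map (fun c => pvStartsN rws k + c)) ++ js) r out =
      pvRunMarks off starts js (if ms = [] then r else k)
        (out ++ ms.map (fun c => pvKey off (k : Int) (c : Int))) := by
  intro ms
  induction ms with
  | nil => intro _ r hr out js; simp
  | cons c ms ih =>
    intro hms r hr out js
    simp only [List.map_cons, List.cons_append, pvRunMarks]
    have hadv : pvAdvance starts ((pvStartsN rws k + c : Nat) : Int) r = k := by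
      apply pv_advance_eq starts rws.length hlen k hk _ _ _ r hr
      · intro i hi
        rw [hget i (by omega)]
        have := pv_startsN_mono rws i k hi
        push_cast
        omega
      · intro hk1
        rw [hget (k + 1) hk1, pv_startsN_succ rws k hk]
        have hc := hms c (by simp)
        push_cast
        omega
    rw [hadv]
    have hkey : ((pvStartsN rws k + c : Nat) : Int) - starts.getD k 0 = (c : Int) := by
      rw [hget k hk]; push_cast; ring
    rw [hkey]
    rw [ih (fun x hx => hms x (by simp [hx])) k le_rfl]
    simp only [if_neg (by simp : ¬ (c :: ms) = [])]
    congr 1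
    · split <;> rfl
    · simp
theorem pv_spec_nil (off : Int) (s : Int) : pvSpec off [] s = [] := rfl

theorem pv_spec_cons (off : Int) (x : List Char) (t : List (List Char)) (s : Int) :
    pvSpec off (x :: t) s = (pvMarks x).map (fun j => pvKey off s (j : Int)) ++ pvSpec off t (s + 1) := by
  simp only [pvSpec]
  rw [show PySem.List.enumerate (x :: t) s = (s, x) :: PySem.List.enumerate t (s + 1) from rfl]
  simp

theorem pv_marks_lt (cs : List Char) : ∀ c ∈ pvMarks cs, c < cs.length := by
  intro c hc
  unfold pvMarks at hc
  exact List.mem_range.mp (List.mem_of_mem_filter hc)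

theorem pv_main (off : Int) (starts : List Int) (rws : List (List Char))
    (hlen : starts.length = rws.length)
    (hget : ∀ i, i < rws.length → starts.getD i 0 = (pvStartsN rws i : Int)) :
    ∀ (m k : Nat), rws.length - k = m → k ≤ rws.length →
    ∀ (r : Nat), r ≤ k → ∀ (out : List Int),
    pvRunMarks off starts
        ((pvMarks (PySem.Chars.join ['\n'] (rws.drop k))).map (fun c => pvStartsN rws k + c)) r out
      = out ++ pvSpec off (rws.drop k) (k : Int) := by
  intro m
  induction m with
  | zero =>
    intro k hm hk r hr out
    rw [List.drop_eq_nil_of_le (by omega)]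
    simp [PySem.Chars.join_nil, pvMarks, pvRunMarks, pv_spec_nil]
  | succ m ih =>
    intro k hm hk r hr out
    have hk' : k < rws.length := by omega
    have hdrop : rws.drop k = rws[k] :: rws.drop (k + 1) := List.drop_eq_getElem_cons hk'
    have hgetk : rws.getD k [] = rws[k] := by
      simp [List.getD_eq_getElem?_getD, List.getElem?_eq_getElem hk']
    rw [hdrop]
    cases hrest : rws.drop (k + 1) with
    | nil =>
      rw [PySem.Chars.join_singleton]
      rw [← List.append_nil ((pvMarks rws[k]).map (fun c => pvStartsN rws k + c))]
      rw [pv_group off starts rws hlen hget k hk' (pvMarks rws[k])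
        (by rw [hgetk]; exact pv_marks_lt _) r hr out []]
      simp only [pvRunMarks]
      rw [pv_spec_cons, pv_spec_nil, List.append_nil]
    | cons r2 rest2 =>
      rw [PySem.Chars.join_cons_cons]
      rw [List.append_assoc, List.singleton_append]
      rw [pv_marks_append, pv_marks_cons]
      rw [if_neg (by decide)]
      simp only [List.nil_append, List.map_append, List.map_map, Function.comp_def]
      rw [show (fun c => pvStartsN rws k + (rws[k].length + (1 + c)))
            = (fun c => pvStartsN rws (k + 1) + c) from by
        funext c
        rw [pv_startsN_succ rws k hk', hgetk]
        omega]
      rw [pv_group off starts rws hlen hget k hk' (pvMarks rws[k])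
        (by rw [hgetk]; exact pv_marks_lt _) r hr out _]
      rw [← hrest]
      rw [ih (k + 1) (by omega) (by omega) _ (by split <;> omega) _]
      rw [pv_spec_cons]
      rw [show ((k : Int) + 1) = (((k + 1 : Nat)) : Int) from by push_cast; ring]
      simp
theorem pv_starts_fold (lines : List String) :
    ∀ (s0 : List Int) (t0 : Int),
    (lines.foldl (fun st ln => (st.1 ++ [st.2], st.2 + (PySem.Str.len ln : Int) + 1)) (s0, t0)).1
      = s0 ++ (List.range lines.length).map
          (fun i => t0 + (pvStartsN (lines.map String.toList) i : Int)) := by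
  induction lines with
  | nil => intro s0 t0; simp
  | cons ln rest ih =>
    intro s0 t0
    simp only [List.foldl_cons]
    rw [ih]
    rw [List.length_cons, List.range_succ_eq_map]
    simp only [List.map_cons, List.map_map, Function.comp_def]
    rw [List.append_assoc, List.singleton_append]
    congr 1
    congr 1
    · simp [pvStartsN]
    · apply List.map_congr_left
      intro i hi
      rw [PySem.Str.len_eq, pv_startsN_cons]
      push_cast
      ring
theorem pv_row (off rr : Int) (cs : List Char) (acc : List Int) :
    (PySem.List.enumerate cs).foldl (fun inf cch =>
      if cch.2 == '#' then
        inf ++ [PySem.Int.bxor ((rr - off) <<< (32 : Nat)) (PySem.Int.band (cch.1 - off) 4294967295)]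
      else inf) acc
    = acc ++ (pvMarks cs).map (fun j => pvKey off rr (j : Int)) := by
  rw [PySem.List.foldl_append_if]
  congr 1
  rw [PySem.List.enumerate_eq_map_pyRange cs ' ']
  rw [show PySem.List.len cs = ((cs.length : Nat) : Int) from by simp [PySem.List.len]]
  rw [PySem.List.pyRange_zero_natCast]
  simp only [List.filter_map, List.map_map, Function.comp_def]
  have hfm : ∀ (l : List Nat), List.flatMap (fun (a : Nat) => ([((a : Nat) : Int)] : List Int)) l = List.map (fun (a : Nat) => ((a : Nat) : Int)) l := by
    intro l; induction l <;> simp_all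
  simp [PySem.List.pyGetD_natCast, pvMarks, pvKey, List.getD, hfm]

theorem pv_a_body (off : Int) (lines : List String) :
    (PySem.List.enumerate lines).foldl (fun inf rrow =>
      (PySem.List.enumerate rrow.2.toList).foldl (fun inf cch =>
        if cch.2 == '#' then
          inf ++ [PySem.Int.bxor ((rrow.1 - off) <<< (32 : Nat)) (PySem.Int.band (cch.1 - off) 4294967295)]
        else inf) inf) []
    = pvSpec off (lines.map String.toList) 0 := by
  rw [show (fun (inf : List Int) (rrow : Int × String) =>
      (PySem.List.enumerate rrow.2.toList).foldl (fun inf cch =>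
        if cch.2 == '#' then
          inf ++ [PySem.Int.bxor ((rrow.1 - off) <<< (32 : Nat)) (PySem.Int.band (cch.1 - off) 4294967295)]
        else inf) inf)
    = (fun (inf : List Int) (rrow : Int × String) =>
        inf ++ (pvMarks rrow.2.toList).map (fun j => pvKey off rrow.1 (j : Int))) from by
      funext inf rrow
      exact pv_row off rrow.1 rrow.2.toList inf]
  rw [PySem.List.foldl_append_eq_flatMap]
  unfold pvSpec
  rw [pv_enumerate_map]
  simp [List.flatMap_map]
theorem pv_bridge (lines : List String) (off : Int) :
    (PySem.List.enumerate lines).foldl (fun inf rrow =>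
      (PySem.List.enumerate rrow.2.toList).foldl (fun inf cch =>
        if cch.2 == '#' then
          inf ++ [PySem.Int.bxor ((rrow.1 - off) <<< (32 : Nat)) (PySem.Int.band (cch.1 - off) 4294967295)]
        else inf) inf) []
    = pvBLoop off
        (lines.foldl (fun st ln => (st.1 ++ [st.2], st.2 + (PySem.Str.len ln : Int) + 1))
          (([] : List Int), (0 : Int))).1
        (PySem.List.slice (PySem.Chars.splitOn (PySem.Str.join "\n" lines).toList ['#'])
          none (some (-1))) (-1) 0 [] := by
  have hstarts : (lines.foldl (fun st ln => (st.1 ++ [st.2], st.2 + (PySem.Str.len ln : Int) + 1))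
      (([] : List Int), (0 : Int))).1
      = (List.range lines.length).map (fun i => (pvStartsN (lines.map String.toList) i : Int)) := by
    rw [pv_starts_fold]
    simp
  rw [hstarts]
  have hglen : (lines.map String.toList).length = lines.length := by simp
  have hlen : ((List.range lines.length).map
      (fun i => (pvStartsN (lines.map String.toList) i : Int))).length
      = (lines.map String.toList).length := by simp
  have hget : ∀ i, i < (lines.map String.toList).length →
      ((List.range lines.length).map
        (fun i => (pvStartsN (lines.map String.toList) i : Int))).getD i 0
      = (pvStartsN (lines.map String.toList) i : Int) := by
    intro i hi
    rw [hglen] at hi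
    rw [List.getD_eq_getElem?_getD]
    simp [hi]
  have hgrid : (PySem.Str.join "\n" lines).toList
      = PySem.Chars.join ['\n'] (lines.map String.toList) := by
    rw [PySem.Str.toList_join]
    rfl
  rw [hgrid, pv_splitOn_eq, pv_slice_neg_one _ (pv_splitSpec_ne_nil _)]
  rw [show (-1 : Int) = (((0 : Nat) : Int)) - 1 from by norm_num]
  rw [pv_bloop_eq_runMarks]
  rw [show (fun (x : Nat) => 0 + x) = (fun c => pvStartsN (lines.map String.toList) 0 + c) from by
    funext c; simp [pvStartsN]]
  have hm := pv_main off _ (lines.map String.toList) hlen hget (lines.map String.toList).length 0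
    rfl (by omega) 0 le_rfl []
  rw [List.drop_zero] at hm
  rw [hm]
  rw [pv_a_body]
  simp
theorem parse_packed_spec : Claim_equal_parse_packed := by
  intro text _
  unfold Spec_parse_packed
  simp only [parse_packed, parse_packed_alt]
  exact pv_bridge _ _
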